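-- pv_equiv track=rewrite | github.com/qubrabench/qubrabench | qubrabench/examples/hillclimber_kit.py | generate_differing_arrays
-- ===== SOURCE A (Python) =====
-- import itertools
--
-- def generate_differing_arrays(array, num_changes):
--     """
--     Generates a set of arrays which are different from the given array in exactly num_changes places
--     For example, input ([0, 0, 0], 1) will generate set containing: [1, 0, 0] [0, 1, 0] [0, 0, 1]
--     :param array: input array to calculate the distance from
--     :param num_changes: exact number of places that are allowed to be flipped
--     :return: set of arrays which are different from array in exactly num_changes places
--     """
--     # Get all possible combinations of indices in the array
--     index_combinations = itertools.combinations(range(len(array)), num_changes)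
--
--     # Create a set to store the generated arrays
--     arrays = set()
--
--     # Iterate over the combinations of indices
--     for indices in index_combinations:
--         # Create a list of replacement characters for each index
--         replacement_chars = []
--         for i in indices:
--             # Get all possible characters to replace the character at index i, except for the character that was
--             # already there
--             replacement_chars.append([0, 1])
--             if array[i] in replacement_chars[-1]:
--                 replacement_chars[-1].remove(array[i])
--
--         # Generate all possible arrays by replacing the characters at the indices with the replacement characters
--         for replacement in itertools.product(*replacement_chars):
--             new_arr = list(array)
--             for i, c in zip(indices, replacement):
--                 new_arr[i] = c
--             arrays.add(tuple(new_arr))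
--
--     return arrays
-- ===== SOURCE B (Python) =====
-- def generate_differing_arrays(array, num_changes):
--     """Recursive backtracking: choose the set of changed indices (take-or-skip,
--     lexicographic), then assign each chosen index every binary value different
--     from the original. Same result set as the itertools version."""
--     if num_changes < 0:
--         raise ValueError("num_changes must be non-negative")
--     n = len(array)
--     result = set()
--
--     def assign(chosen, j, arr):
--         if j == len(chosen):
--             result.add(tuple(arr))
--             return
--         i = chosen[j]
--         for v in (0, 1):
--             if v != array[i]:
--                 arr2 = list(arr)
--                 arr2[i] = v
--                 assign(chosen, j + 1, arr2)
--
--     def combos(i, k, chosen):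
--         if k == 0:
--             assign(chosen, 0, list(array))
--             return
--         if n - i < k:
--             return
--         combos(i + 1, k - 1, chosen + [i])  # change position i
--         combos(i + 1, k, chosen)            # keep position i
--
--     combos(0, num_changes, [])
--     return result
-- ===== Notes on version B (the rewrite author's own statement) =====
-- stated objective: alternative
-- what changed: Replaces the itertools.combinations x itertools.product pipeline (materialising index tuples and replacement-character lists) by direct recursive backtracking: a take-or-skip recursion chooses the changed index set, then a second recursion assigns each chosen index every binary value different from the original.
import Mathlib
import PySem

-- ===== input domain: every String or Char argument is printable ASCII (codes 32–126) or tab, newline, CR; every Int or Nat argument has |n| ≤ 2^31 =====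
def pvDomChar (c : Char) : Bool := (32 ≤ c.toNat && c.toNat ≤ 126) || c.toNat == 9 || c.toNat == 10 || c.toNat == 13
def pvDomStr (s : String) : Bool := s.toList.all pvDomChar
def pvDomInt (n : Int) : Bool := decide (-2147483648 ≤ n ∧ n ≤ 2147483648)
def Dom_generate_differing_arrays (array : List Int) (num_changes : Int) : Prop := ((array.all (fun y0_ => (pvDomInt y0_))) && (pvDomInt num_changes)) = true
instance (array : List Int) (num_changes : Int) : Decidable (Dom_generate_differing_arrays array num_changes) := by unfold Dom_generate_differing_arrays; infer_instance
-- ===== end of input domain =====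

-- B replaces the itertools.combinations/itertools.product pipeline by direct recursive
-- backtracking (take-or-skip index choice, then value assignment); objective: alternative.

-- ===== PORT A =====
-- itertools.combinations(xs, k): lexicographic order, exact
def pyCombinations : List Nat → Nat → List (List Nat)
  | _, 0 => [[]]
  | [], _ + 1 => []
  | x :: xs, k + 1 => (pyCombinations xs k).map (x :: ·) ++ pyCombinations xs (k + 1)

-- itertools.product(*ls): first factor varies slowest, exact
def pyProduct : List (List Int) → List (List Int)
  | [] => [[]]
  | l :: ls => l.flatMap (fun v => (pyProduct ls).map (v :: ·))

def generate_differing_arrays (array : List Int) (num_changes : Int) : List (List Int) :=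
  if num_changes < 0 then []  -- itertools.combinations raises ValueError here; excluded by Pre_
  else
    let index_combinations := pyCombinations (List.range array.length) num_changes.toNat
    index_combinations.foldl (fun arrays indices =>
      -- replacement_chars: [0,1] with array[i] removed when present (i < len array, so getD is exact)
      let replacement_chars := indices.map (fun i =>
        if ([0, 1] : List Int).contains (array.getD i 0)
        then ([0, 1] : List Int).erase (array.getD i 0) else [0, 1])
      (pyProduct replacement_chars).foldl (fun arrays replacement =>
        let new_arr := (indices.zip replacement).foldl (fun na p => na.set p.1 p.2) array
        PySem.Set.add arrays new_arr) arrays)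
      PySem.Set.empty

-- ===== PORT B =====
-- assign(chosen, j, arr): structural over the suffix of chosen; inner loop over (0, 1)
mutual
def gdaAssign (array : List Int) : List Nat → List Int → PySem.Set (List Int) → PySem.Set (List Int)
  | [], arr, res => PySem.Set.add res arr
  | i :: rest, arr, res => gdaAssignLoop array rest i arr [0, 1] res
  termination_by l _ _ => (l.length, 0)
def gdaAssignLoop (array : List Int) (rest : List Nat) (i : Nat) (arr : List Int) :
    List Int → PySem.Set (List Int) → PySem.Set (List Int)
  | [], res => res
  | v :: vs, res =>
      gdaAssignLoop array rest i arr vs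
        (if v ≠ array.getD i 0 then gdaAssign array rest (arr.set i v) res else res)
  termination_by vs _ => (rest.length, vs.length + 1)
end


-- combos(i, k, chosen): take-or-skip recursion over positions
def gdaCombos (array : List Int) (n : Nat) :
    Nat → Nat → List Nat → PySem.Set (List Int) → PySem.Set (List Int)
  | _, 0, chosen, res => gdaAssign array chosen array res
  | i, k + 1, chosen, res =>
      if n - i < k + 1 then res
      else gdaCombos array n (i + 1) (k + 1) chosen (gdaCombos array n (i + 1) k (chosen ++ [i]) res)
termination_by i k _ _ => (k, n - i)
decreasing_by · omega
              · omega

def generate_differing_arrays_alt (array : List Int) (num_changes : Int) : List (List Int) :=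
  if num_changes < 0 then []  -- Source B raises ValueError here; excluded by Pre_
  else gdaCombos array array.length 0 num_changes.toNat [] PySem.Set.empty

-- ===== PRECONDITION & SPEC =====
-- A raises ValueError (itertools.combinations) on negative num_changes; B raises ValueError there too.
def Pre_generate_differing_arrays (array : List Int) (num_changes : Int) : Prop := 0 ≤ num_changes
instance (array : List Int) (num_changes : Int) : Decidable (Pre_generate_differing_arrays array num_changes) := by unfold Pre_generate_differing_arrays; infer_instance
def pvWitness_generate_differing_arrays : List Int × Int := ([0, 0, 1], 1)

def Spec_generate_differing_arrays (array : List Int) (num_changes : Int) (out : List (List Int)) : Prop := out = generate_differing_arrays_alt array num_changes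
instance (array : List Int) (num_changes : Int) (out : List (List Int)) : Decidable (Spec_generate_differing_arrays array num_changes out) := by unfold Spec_generate_differing_arrays; infer_instance

-- ===== CLAIM (what is proved, stated in full; the proofs are below) =====
def Claim_equal_generate_differing_arrays : Prop := ∀ (array : List Int) (num_changes : Int), Dom_generate_differing_arrays array num_changes → Pre_generate_differing_arrays array num_changes → Spec_generate_differing_arrays array num_changes (generate_differing_arrays array num_changes)

-- ===== LEMMAS AND PROOFS =====

-- A's replacement list for original value a is [0,1] filtered of a
lemma cand_eq (a : Int) :
    (if ([0, 1] : List Int).contains a then ([0, 1] : List Int).erase a else [0, 1])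
      = ([0, 1] : List Int).filter (fun v => v ≠ a) := by
  by_cases h0 : a = 0
  · subst h0; decide
  · by_cases h1 : a = 1
    · subst h1; decide
    · rw [if_neg (by simp [List.contains_eq_mem]; exact ⟨h0, h1⟩)]
      simp [List.filter, Ne.symm h0, Ne.symm h1]

-- per-combination: A's product fold equals B's assignment recursion
lemma assign_eq (array : List Int) :
    ∀ (indices : List Nat) (arr : List Int) (res : PySem.Set (List Int)),
      (pyProduct (indices.map (fun i =>
          if ([0, 1] : List Int).contains (array.getD i 0)
          then ([0, 1] : List Int).erase (array.getD i 0) else [0, 1]))).foldl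
        (fun res repl =>
          PySem.Set.add res ((indices.zip repl).foldl (fun na p => na.set p.1 p.2) arr)) res
      = gdaAssign array indices arr res := by
  intro indices
  induction indices with
  | nil => intro arr res; simp [pyProduct, gdaAssign]
  | cons i rest ih =>
    intro arr res
    rw [List.map_cons, cand_eq]
    show ((([0, 1] : List Int).filter (fun v => v ≠ array.getD i 0)).flatMap
        (fun v => (pyProduct (rest.map _)).map (v :: ·))).foldl _ res = _
    rw [show gdaAssign array (i :: rest) arr res = gdaAssignLoop array rest i arr [0, 1] res
          from by rw [gdaAssign]]
    have loop : ∀ (vs : List Int) (res : PySem.Set (List Int)),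
        ((vs.filter (fun v => v ≠ array.getD i 0)).flatMap
            (fun v => (pyProduct (rest.map (fun j =>
              if ([0, 1] : List Int).contains (array.getD j 0)
              then ([0, 1] : List Int).erase (array.getD j 0) else [0, 1]))).map (v :: ·))).foldl
          (fun res repl =>
            PySem.Set.add res (((i :: rest).zip repl).foldl (fun na p => na.set p.1 p.2) arr)) res
        = gdaAssignLoop array rest i arr vs res := by
      intro vs
      induction vs with
      | nil => intro res; simp [gdaAssignLoop]
      | cons v vs ihv =>
        intro res
        by_cases hv : v = array.getD i 0
        · rw [List.filter_cons_of_neg (by simpa using hv), ihv,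
            show gdaAssignLoop array rest i arr (v :: vs) res
                = gdaAssignLoop array rest i arr vs res from by
                  rw [gdaAssignLoop, if_neg (not_not_intro hv)]]
        · rw [List.filter_cons_of_pos (by simpa using hv), List.flatMap_cons, List.foldl_append,
            List.foldl_map]
          simp only [List.zip_cons_cons, List.foldl_cons]
          rw [ih (arr.set i v) res, ihv,
            show gdaAssignLoop array rest i arr (v :: vs) res
                = gdaAssignLoop array rest i arr vs (gdaAssign array rest (arr.set i v) res)
              from by rw [gdaAssignLoop, if_pos hv]]
    exact loop [0, 1] res

-- pyCombinations of a too-short list is empty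
lemma pyCombinations_eq_nil : ∀ (xs : List Nat) (k : Nat), xs.length < k → pyCombinations xs k = [] := by
  intro xs
  induction xs with
  | nil =>
    intro k hk
    cases k with
    | zero => omega
    | succ k => rw [pyCombinations]
  | cons x xs ih =>
    intro k hk
    cases k with
    | zero => omega
    | succ k =>
      simp only [List.length_cons] at hk
      rw [pyCombinations, ih k (by omega), ih (k + 1) (by omega)]
      simp

-- combinations fold = take-or-skip recursion
lemma combos_eq (array : List Int) (n : Nat) :
    ∀ (fuel i k : Nat) (chosen : List Nat) (res : PySem.Set (List Int)), n - i ≤ fuel →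
      (pyCombinations ((List.range n).drop i) k).foldl
        (fun res t => gdaAssign array (chosen ++ t) array res) res
      = gdaCombos array n i k chosen res := by
  intro fuel
  induction fuel with
  | zero =>
    intro i k chosen res h
    rw [List.drop_eq_nil_of_le (by simpa using (by omega : n ≤ i))]
    cases k with
    | zero => rw [pyCombinations, gdaCombos]; simp
    | succ k => rw [pyCombinations, gdaCombos, if_pos (by omega)]; rfl
  | succ fuel ihf =>
    intro i k chosen res h
    cases k with
    | zero => rw [pyCombinations, gdaCombos]; simp
    | succ k =>
      rw [gdaCombos]
      by_cases h2 : n - i < k + 1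
      · rw [if_pos h2, pyCombinations_eq_nil _ _ (by simp; omega)]
        rfl
      · rw [if_neg h2]
        have hi : i < n := by omega
        rw [List.drop_eq_getElem_cons (by simpa using hi)]
        simp only [List.getElem_range]
        rw [pyCombinations, List.foldl_append, List.foldl_map]
        have e1 : (fun (res : PySem.Set (List Int)) t => gdaAssign array (chosen ++ i :: t) array res)
            = fun res t => gdaAssign array ((chosen ++ [i]) ++ t) array res := by
          funext res t
          rw [List.append_cons]
        rw [e1, ihf (i + 1) k (chosen ++ [i]) res (by omega),
          ihf (i + 1) (k + 1) chosen _ (by omega)]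

-- ===== VERDICT (by name: the statement is the Claim_ definition above) =====
theorem generate_differing_arrays_spec : Claim_equal_generate_differing_arrays := by
  intro array num_changes _ hpre
  unfold Spec_generate_differing_arrays
  unfold generate_differing_arrays generate_differing_arrays_alt
  rw [if_neg (not_lt.mpr hpre), if_neg (not_lt.mpr hpre)]
  have h1 := combos_eq array array.length array.length 0 num_changes.toNat []
    PySem.Set.empty (by omega)
  simp only [List.drop_zero, List.nil_append] at h1
  rw [← h1]
  have hf : (fun (arrays : PySem.Set (List Int)) (indices : List Nat) =>
      (pyProduct (indices.map (fun i =>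
        if ([0, 1] : List Int).contains (array.getD i 0)
        then ([0, 1] : List Int).erase (array.getD i 0) else [0, 1]))).foldl
        (fun arrays replacement =>
          PySem.Set.add arrays
            ((indices.zip replacement).foldl (fun na p => na.set p.1 p.2) array)) arrays)
      = fun arrays indices => gdaAssign array indices array arrays := by
    funext arrays indices
    exact assign_eq array indices array arrays
  rw [hf]
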